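-- pv_equiv track=rewrite | github.com/pranavajitnair/SCRF-for-Name-Entity-Recognition | data_loader.py | iob_iobes
-- ===== SOURCE A (Python) =====
-- def iob_iobes(tags):
--
--         new_tags=[]
--         iob2(tags)
--
--         for i,tag in enumerate(tags):
--
--             if tag=='O':
--                 new_tags.append(tag)
--
--             elif tag.split('-')[0]=='B':
--
--                 if i+1!=len(tags) and \
--                    tags[i+1].split('-')[0]=='I':
--                     new_tags.append(tag)
--                 else:
--                     new_tags.append(tag.replace('B-','S-'))
--
--             elif tag.split('-')[0]=='I':
--
--                 if i+1<len(tags) and \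
--                         tags[i+1].split('-')[0]=='I':
--                     new_tags.append(tag)
--                 else:
--                     new_tags.append(tag.replace('I-','E-'))
--
--             else:
--                 raise Exception('Invalid IOB format!')
--
--         return new_tags
--
-- def iob2(tags):
--
--         for i,tag in enumerate(tags):
--
--             if tag=='O':
--                 continue
--             split=tag.split('-')
--             if len(split)!=2 or split[0] not in ['I','B']:
--                 return False
--             if split[0]=='B':
--                 continue
--             elif i==0 or tags[i-1]=='O':
--                 tags[i]='B'+tag[1:]
--             elif tags[i-1][1:]==tag[1:]:
--                 continue
--             else:
--                 tags[i]='B'+tag[1:]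
--
--         return True
-- ===== SOURCE B (Python) =====
-- def iob2(tags):
--
--         for i,tag in enumerate(tags):
--
--             if tag=='O':
--                 continue
--             split=tag.split('-')
--             if len(split)!=2 or split[0] not in ['I','B']:
--                 return False
--             if split[0]=='B':
--                 continue
--             elif i==0 or tags[i-1]=='O':
--                 tags[i]='B'+tag[1:]
--             elif tags[i-1][1:]==tag[1:]:
--                 continue
--             else:
--                 tags[i]='B'+tag[1:]
--
--         return True
--
--
-- def iob_iobes(tags):
--     # Single right-to-left pass carrying a "next tag starts with I" flag,
--     # so no indexed lookahead is needed; same iob2 in-place fixup first.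
--     iob2(tags)
--     out = []
--     next_is_I = False
--     for tag in reversed(tags):
--         if tag == 'O':
--             out.append(tag)
--             next_is_I = False
--         else:
--             p = tag.split('-')[0]
--             if p == 'B':
--                 out.append(tag if next_is_I else tag.replace('B-', 'S-'))
--             elif p == 'I':
--                 out.append(tag if next_is_I else tag.replace('I-', 'E-'))
--             else:
--                 raise Exception('Invalid IOB format!')
--             next_is_I = (p == 'I')
--     out.reverse()
--     return out
-- ===== Notes on version B (the rewrite author's own statement) =====
-- stated objective: alternative
-- what changed: Replaces A's indexed enumerate loop with a tags[i+1] lookahead by a single right-to-left pass over the iob2-fixed list that carries a 'next tag starts with I' flag and builds the output back-to-front.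
import Mathlib
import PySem

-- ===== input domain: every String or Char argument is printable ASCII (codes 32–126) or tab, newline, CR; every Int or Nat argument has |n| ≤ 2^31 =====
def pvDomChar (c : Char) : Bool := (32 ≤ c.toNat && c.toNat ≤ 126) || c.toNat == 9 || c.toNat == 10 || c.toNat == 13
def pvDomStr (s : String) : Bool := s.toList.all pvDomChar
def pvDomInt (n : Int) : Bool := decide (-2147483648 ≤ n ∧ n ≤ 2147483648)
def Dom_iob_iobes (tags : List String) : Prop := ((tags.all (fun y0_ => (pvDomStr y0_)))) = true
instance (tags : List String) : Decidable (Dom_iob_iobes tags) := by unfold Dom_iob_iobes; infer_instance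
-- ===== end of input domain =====

-- B replaces A's indexed loop with tags[i+1] lookahead by one right-to-left pass carrying a
-- "next tag starts with I" flag (alternative decomposition; same cost).  Both A and B first run
-- the same in-place iob2 fixup on the argument list; the equivalence proved here is about the
-- RETURN value (the mutation of `tags` is identical in both, performed by the shared iob2).

-- tag.split('-')[0]  (split of a nonempty separator always yields a nonempty list)
def splitHead (t : String) : String := ((PySem.Str.split? t "-").getD []).headD ""

-- ===== PORT A =====
-- iob2(tags): in-place IOB1→IOB2 fixup; returns the mutated list (A ignores iob2's bool result;
-- an early `return False` leaves the remaining tags unchanged).  Source B contains this identical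
-- helper verbatim, so it is shared by both ports.
-- one enumerate step; the Bool is "iob2 already returned False" (the early return stops
-- all further mutation; A ignores the returned bool)
def iob2Step (acc : List String × Bool) (i : Nat) : List String × Bool :=
  if acc.2 then acc
  else
    let tags := acc.1
    let tag := tags.getD i ""
    if tag == "O" then (tags, false)
    else
      let sp := (PySem.Str.split? tag "-").getD []
      if sp.length != 2 || !(sp.headD "" == "I" || sp.headD "" == "B") then (tags, true)
      else if sp.headD "" == "B" then (tags, false)
      else if i == 0 || tags.getD (i-1) "" == "O" then
        (tags.set i ("B" ++ PySem.Str.slice tag (some 1) none), false)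
      else if PySem.Str.slice (tags.getD (i-1) "") (some 1) none
                == PySem.Str.slice tag (some 1) none then
        (tags, false)
      else
        (tags.set i ("B" ++ PySem.Str.slice tag (some 1) none), false)

def iob2Run (tags : List String) : List String :=
  ((List.range tags.length).foldl iob2Step (tags, false)).1

-- A's main loop: for i,tag in enumerate(tags) with tags[i+1] lookahead; none = the `raise`
def loopA (l : List String) : List String → Nat → List String → Option (List String)
  | [], _, acc => some acc
  | tag :: rest, i, acc =>
    if tag == "O" then loopA l rest (i+1) (acc ++ [tag])
    else if splitHead tag == "B" then
      if (i + 1 != l.length) && (splitHead (l.getD (i+1) "") == "I") then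
        loopA l rest (i+1) (acc ++ [tag])
      else
        loopA l rest (i+1) (acc ++ [PySem.Str.replace tag "B-" "S-"])
    else if splitHead tag == "I" then
      if (decide (i + 1 < l.length)) && (splitHead (l.getD (i+1) "") == "I") then
        loopA l rest (i+1) (acc ++ [tag])
      else
        loopA l rest (i+1) (acc ++ [PySem.Str.replace tag "I-" "E-"])
    else none

def iob_iobes (tags : List String) : List String :=
  match loopA (iob2Run tags) (iob2Run tags) 0 [] with
  | some out => out
  | none => []          -- Python raises Exception('Invalid IOB format!') here; excluded by Pre_

-- ===== PORT B =====
-- B's loop: walk reversed(tags) carrying next_is_I; none = the `raise`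
def altGo (rev : List String) (nextI : Bool) (out : List String) : Option (List String) :=
  match rev with
  | [] => some out
  | tag :: rest =>
    if tag == "O" then altGo rest false (out ++ [tag])
    else
      let p := splitHead tag
      if p == "B" then
        altGo rest (p == "I") (out ++ [if nextI then tag else PySem.Str.replace tag "B-" "S-"])
      else if p == "I" then
        altGo rest (p == "I") (out ++ [if nextI then tag else PySem.Str.replace tag "I-" "E-"])
      else none

def iob_iobes_alt (tags : List String) : List String :=
  match altGo (iob2Run tags).reverse false [] with
  | some out => out.reverse
  | none => []

-- ===== PRECONDITION & SPEC =====
-- Pre_ excludes exactly the inputs on which the Python A raises Exception('Invalid IOB format!'):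
-- those containing a tag that is neither 'O' nor prefixed (before the first '-') by 'B' or 'I'.
def Pre_iob_iobes (tags : List String) : Prop :=
  ∀ t ∈ tags, t = "O" ∨ ((PySem.Str.split? t "-").getD []).headD "" = "B"
                      ∨ ((PySem.Str.split? t "-").getD []).headD "" = "I"
instance (tags : List String) : Decidable (Pre_iob_iobes tags) := by
  unfold Pre_iob_iobes; infer_instance

def pvWitness_iob_iobes : List String := ["B-PER", "I-PER", "O", "B-LOC", "I-LOC", "I-ORG"]

def Spec_iob_iobes (tags : List String) (out : List String) : Prop := out = iob_iobes_alt tags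
instance (tags : List String) (out : List String) : Decidable (Spec_iob_iobes tags out) := by
  unfold Spec_iob_iobes; infer_instance

-- ===== CLAIM (what is proved, stated in full; the proofs are below) =====
def Claim_equal_iob_iobes : Prop :=
  ∀ (tags : List String), Dom_iob_iobes tags → Pre_iob_iobes tags →
    Spec_iob_iobes tags (iob_iobes tags)

-- ===== LEMMAS AND PROOFS =====

-- proof-side vocabulary
def validB (t : String) : Bool := t == "O" || splitHead t == "B" || splitHead t == "I"
def flagOf (t : String) : Bool := splitHead t == "I"
def emit (t : String) (n : Bool) : String :=
  if t == "O" then t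
  else if splitHead t == "B" then (if n then t else PySem.Str.replace t "B-" "S-")
  else if n then t else PySem.Str.replace t "I-" "E-"
-- "next tag has prefix I", with default b at the end of the list
def nIF : List String → Bool → Bool
  | [], b => b
  | u :: _, _ => flagOf u
-- forward one-pass specification shared by both loops
def convF : List String → Bool → List String
  | [], _ => []
  | t :: rest, b => emit t (nIF rest b) :: convF rest b
-- what B's pass computes on the reversed list
def goRev : List String → Bool → List String
  | [], _ => []
  | t :: rest, b => emit t b :: goRev rest (flagOf t)
def flagAfter : List String → Bool → Bool
  | [], b => b
  | t :: rest, _ => flagAfter rest (flagOf t)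

theorem flagAfter_append_singleton (xs : List String) (u : String) (b : Bool) :
    flagAfter (xs ++ [u]) b = flagOf u := by
  induction xs generalizing b with
  | nil => simp [flagAfter]
  | cons t rest ih => simp [flagAfter, ih]

theorem goRev_append (xs ys : List String) (b : Bool) :
    goRev (xs ++ ys) b = goRev xs b ++ goRev ys (flagAfter xs b) := by
  induction xs generalizing b with
  | nil => simp [goRev, flagAfter]
  | cons t rest ih => simp [goRev, flagAfter, ih]

theorem goRev_reverse (l : List String) (b : Bool) :
    goRev l.reverse b = (convF l b).reverse := by
  induction l generalizing b with
  | nil => simp [goRev, convF]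
  | cons t rest ih =>
    rw [List.reverse_cons, goRev_append, ih]
    have hflag : flagAfter rest.reverse b = nIF rest b := by
      cases rest with
      | nil => simp [flagAfter, nIF]
      | cons u tl => rw [List.reverse_cons, flagAfter_append_singleton]; simp [nIF]
    simp [goRev, convF, hflag]

theorem altGo_spec (r : List String) (b : Bool) (acc : List String) :
    altGo r b acc = if r.all validB then some (acc ++ goRev r b) else none := by
  induction r generalizing b acc with
  | nil => simp [altGo, goRev]
  | cons t rest ih =>
    by_cases hO : t = "O"
    · subst hO
      rw [altGo, if_pos (show (("O" : String) == "O") = true from rfl), ih]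
      have hv : validB "O" = true := by decide
      have he : emit "O" b = "O" := by simp [emit]
      have hf : flagOf "O" = false := by decide
      simp [goRev, hv, he, hf]
    · have hO' : (t == "O") = false := by simp [hO]
      by_cases hB : splitHead t = "B"
      · rw [altGo]
        simp only [hO', Bool.false_eq_true, if_false, hB, beq_self_eq_true, if_pos, ih]
        have hv : validB t = true := by simp [validB, hB]
        have he : emit t b = if b then t else PySem.Str.replace t "B-" "S-" := by
          simp [emit, hO', hB]
        simp [goRev, hv, he, flagOf, hB]
      · by_cases hI : splitHead t = "I"
        · have hB' : (splitHead t == "B") = false := by simp [hB]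
          rw [altGo]
          simp only [hO', Bool.false_eq_true, if_false, hI, beq_self_eq_true, if_pos, ih]
          have hv : validB t = true := by simp [validB, hI]
          have he : emit t b = if b then t else PySem.Str.replace t "I-" "E-" := by
            simp [emit, hO', hB']
          simp [goRev, hv, he, flagOf, hI]
        · have hv : validB t = false := by simp [validB, hO, hB, hI]
          rw [altGo]
          simp [hO', hB, hI, hv]

theorem nIF_guard (l : List String) (i : Nat) (h : i < l.length) :
    ((i + 1 != l.length) && (splitHead (l.getD (i+1) "") == "I")) = nIF (l.drop (i+1)) false := by
  by_cases hlen : i + 1 < l.length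
  · rw [List.drop_eq_getElem_cons hlen]
    have hne : (i + 1 != l.length) = true := by simp; omega
    simp [hne, nIF, flagOf, List.getElem?_eq_getElem hlen]
  · have heq : i + 1 = l.length := by omega
    simp [nIF, heq]

theorem nIF_guard' (l : List String) (i : Nat) (h : i < l.length) :
    ((decide (i + 1 < l.length)) && (splitHead (l.getD (i+1) "") == "I"))
      = nIF (l.drop (i+1)) false := by
  rw [← nIF_guard l i h]
  by_cases hlen : i + 1 < l.length
  · have hne : (i + 1 != l.length) = true := by simp; omega
    simp [hlen, hne]
  · have heq : i + 1 = l.length := by omega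
    simp [heq]

theorem loopA_spec (l : List String) (rem : List String) (i : Nat) (acc : List String)
    (hdrop : l.drop i = rem) :
    loopA l rem i acc
      = if rem.all validB then some (acc ++ convF rem false) else none := by
  induction rem generalizing i acc with
  | nil => simp [loopA, convF]
  | cons t rest ih =>
    have h : i < l.length := by
      by_contra hge
      have : l.drop i = [] := List.drop_eq_nil_of_le (by omega)
      simp [this] at hdrop
    have hrest : l.drop (i+1) = rest := by
      have h2 := congrArg List.tail hdrop
      rw [List.tail_drop] at h2
      simpa using h2
    have hrec := fun acc => ih (i+1) acc hrest
    rw [loopA]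
    by_cases hO : t = "O"
    · rw [if_pos (by simp [hO])]
      rw [hrec]
      have hv : validB t = true := by simp [validB, hO]
      have he : emit t (nIF rest false) = t := by simp [emit, hO]
      simp [convF, hv, he]
    · have hO' : (t == "O") = false := by simp [hO]
      by_cases hB : splitHead t = "B"
      · rw [if_neg (by simp [hO]), if_pos (by simp [hB]), nIF_guard l i h, hrest]
        have hv : validB t = true := by simp [validB, hB]
        by_cases hg : nIF rest false
        · rw [if_pos hg, hrec]; simp [convF, hv, hg, emit, hO', hB]
        · rw [if_neg hg, hrec]; simp [convF, hv, hg, emit, hO', hB]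
      · by_cases hI : splitHead t = "I"
        · have hB' : (splitHead t == "B") = false := by simp [hB]
          rw [if_neg (by simp [hO]), if_neg (by simp [hB']), if_pos (by simp [hI]),
            nIF_guard' l i h, hrest]
          have hv : validB t = true := by simp [validB, hI]
          by_cases hg : nIF rest false
          · rw [if_pos hg, hrec]; simp [convF, hv, hg, emit, hO', hI]
          · rw [if_neg hg, hrec]; simp [convF, hv, hg, emit, hO', hI]
        · have hv : validB t = false := by simp [validB, hO, hB, hI]
          rw [if_neg (by simp [hO]), if_neg (by simp [hB]), if_neg (by simp [hI])]
          simp [hv]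

theorem main_eq (tags : List String) : iob_iobes tags = iob_iobes_alt tags := by
  unfold iob_iobes iob_iobes_alt
  rw [loopA_spec _ _ 0 [] List.drop_zero, altGo_spec, List.all_reverse, goRev_reverse]
  by_cases h : (iob2Run tags).all validB
  · simp [h]
  · simp [h]

-- ===== VERDICT (by name: the statement is the Claim_ definition above) =====
theorem iob_iobes_spec : Claim_equal_iob_iobes := by
  intro tags _ _
  unfold Spec_iob_iobes
  exact main_eq tags
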